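-- pv_equiv track=rewrite | github.com/erfans-sketch/math-construct-problems | CT4/solution.py | _divides_factorial
-- ===== SOURCE A (Python) =====
-- def _prime_factors_with_exponents(m: int):
--     if m <= 0:
--         raise ValueError("m must be positive")
--     x = m
--     pf = {}
--     while x % 2 == 0:
--         pf[2] = pf.get(2, 0) + 1
--         x //= 2
--     f = 3
--     while f * f <= x:
--         while x % f == 0:
--             pf[f] = pf.get(f, 0) + 1
--             x //= f
--         f += 2
--     if x > 1:
--         pf[x] = pf.get(x, 0) + 1
--     return pf
--
-- def _vp_factorial(n: int, p: int) -> int: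
--     if p < 2:
--         return 0
--     e = 0
--     nn = n
--     while nn:
--         nn //= p
--         e += nn
--     return e
--
-- def _divides_factorial(n: int, k: int) -> bool:
--     if k <= 0:
--         return False
--     pf = _prime_factors_with_exponents(k)
--     for p, e in pf.items():
--         if _vp_factorial(n, p) < e:
--             return False
--     return True
-- ===== SOURCE B (Python) =====
-- def _divides_factorial(n: int, k: int) -> bool:
--     if k <= 0:
--         return False
--     if k <= n:
--         return True  # k itself is one of the factors of n!
--     remaining = k
--     i = 2
--     while i <= n and remaining > 1:
--         # g = gcd(remaining, i) by Euclid's algorithm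
--         a, b = remaining, i
--         while b:
--             a, b = b, a % b
--         remaining //= a
--         i += 1
--     return remaining == 1
-- ===== Notes on version B (the rewrite author's own statement) =====
-- stated objective: alternative
-- what changed: Replaces A's prime-factorization of k plus per-prime Legendre-formula exponent counting by a gcd-reduction sweep: remaining = k is repeatedly divided by gcd(remaining, i) for i = 2..n (with an early exit when remaining hits 1 and a k <= n shortcut), and k divides n! iff remaining ends at 1; no primes or exponents are ever computed.
import Mathlib
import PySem

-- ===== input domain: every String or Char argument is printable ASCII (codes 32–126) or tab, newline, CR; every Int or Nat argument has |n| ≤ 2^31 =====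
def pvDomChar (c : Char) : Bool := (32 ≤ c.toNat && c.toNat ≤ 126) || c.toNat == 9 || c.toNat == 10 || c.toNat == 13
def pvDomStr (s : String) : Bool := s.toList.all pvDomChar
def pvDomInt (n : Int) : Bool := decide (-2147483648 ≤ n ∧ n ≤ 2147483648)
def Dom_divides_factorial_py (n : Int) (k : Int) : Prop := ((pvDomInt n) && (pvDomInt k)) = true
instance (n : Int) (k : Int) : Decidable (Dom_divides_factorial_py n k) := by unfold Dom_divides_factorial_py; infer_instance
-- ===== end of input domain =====

-- B replaces A's prime-factorization of k + Legendre-formula exponent comparison by a gcd-reduction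
-- sweep (remaining //= gcd(remaining, i) for i = 2..n); equivalence of the RETURN values is proved on
-- Pre_ (0 ≤ n ∨ k ≤ 1).

-- ===== PORT A =====
-- the shared 'while x % f == 0: pf[f] = pf.get(f,0)+1; x //= f' loop of _prime_factors_with_exponents
-- (used once with f = 2 and once per odd trial f); the '0 < x' guard only makes the recursion total —
-- it always holds where Python runs this loop (m ≥ 1).
theorem pyA_divLoop_dec (f x : Int) (h : 0 < x ∧ 2 ≤ f ∧ PySem.Int.mod x f = 0) :
    (PySem.Int.floordiv x f).toNat < x.toNat := by
  obtain ⟨hx, hf, hm⟩ := h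
  have hdvd : f ∣ x := (PySem.Int.mod_eq_zero_iff_dvd x f).mp hm
  have h2 : PySem.Int.floordiv x f = x / f := PySem.Int.floordiv_eq_ediv_of_pos (by omega)
  have hge : f ≤ x := Int.le_of_dvd hx hdvd
  have : x / f < x := by
    apply Int.ediv_lt_of_lt_mul (by omega)
    nlinarith
  rw [h2]
  exact (Int.toNat_lt_toNat hx).mpr this

def pyA_divLoop (f x : Int) (pf : PySem.Dict Int Int) : Int × PySem.Dict Int Int :=
  if h : 0 < x ∧ 2 ≤ f ∧ PySem.Int.mod x f = 0 then
    pyA_divLoop f (PySem.Int.floordiv x f) (pf.insert f (pf.getD f 0 + 1))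
  else (x, pf)
termination_by x.toNat
decreasing_by exact pyA_divLoop_dec f x h

-- facts needed by pyA_fLoop's termination proof (cited in its decreasing_by)
theorem pyA_divLoop_fst_pos_le (f x : Int) (pf : PySem.Dict Int Int) :
    0 < x → 0 < (pyA_divLoop f x pf).1 ∧ (pyA_divLoop f x pf).1 ≤ x := by
  fun_induction pyA_divLoop f x pf with
  | case1 x pf h ih =>
    intro hx
    rcases h with ⟨hx', hf, hm⟩
    have hdvd : f ∣ x := (PySem.Int.mod_eq_zero_iff_dvd x f).mp hm
    have h2 : PySem.Int.floordiv x f = x / f := PySem.Int.floordiv_eq_ediv_of_pos (by omega)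
    have hpos : 0 < PySem.Int.floordiv x f := by
      rw [h2]; exact Int.ediv_pos_of_pos_of_dvd hx' (by omega) hdvd
    have hle : PySem.Int.floordiv x f ≤ x := by
      rw [h2]
      exact Int.ediv_le_self f (le_of_lt hx')
    obtain ⟨t1, t2⟩ := ih hpos
    exact ⟨t1, t2.trans hle⟩
  | case2 x pf h =>
    intro hx
    exact ⟨hx, le_refl x⟩

-- 'f = 3; while f * f <= x: (inner loop); f += 2'; 3 ≤ f only records the initial value, making
-- termination provable; Python reaches this loop only with f ≥ 3.
theorem pyA_fLoop_dec (f x : Int) (pf : PySem.Dict Int Int) (h : 3 ≤ f ∧ f * f ≤ x) :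
    ((pyA_divLoop f x pf).1 + 1 - (f + 2)).toNat < (x + 1 - f).toNat := by
  obtain ⟨hf, hfx⟩ := h
  have hx : 0 < x := by nlinarith
  have h1 := pyA_divLoop_fst_pos_le f x pf hx
  have hfx' : f < x := by nlinarith
  omega

def pyA_fLoop (f x : Int) (pf : PySem.Dict Int Int) : Int × PySem.Dict Int Int :=
  if h : 3 ≤ f ∧ f * f ≤ x then
    pyA_fLoop (f + 2) (pyA_divLoop f x pf).1 (pyA_divLoop f x pf).2
  else (x, pf)
termination_by (x + 1 - f).toNat
decreasing_by exact pyA_fLoop_dec f x pf h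

-- _prime_factors_with_exponents; the m ≤ 0 branch stands for Python's ValueError ('raise' is
-- unreachable from _divides_factorial, which only calls it with m = k ≥ 1)
def pyA_primeFactors (m : Int) : PySem.Dict Int Int :=
  if m ≤ 0 then PySem.Dict.empty else
    let r2 := pyA_divLoop 2 m PySem.Dict.empty
    let rf := pyA_fLoop 3 r2.1 r2.2
    if 1 < rf.1 then rf.2.insert rf.1 (rf.2.getD rf.1 0 + 1) else rf.2

-- 'while nn: nn //= p; e += nn' of _vp_factorial; 0 < nn (vs Python's nn ≠ 0) makes it total:
-- Python loops forever on nn < 0, and such calls are excluded by Pre_.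
theorem pyA_vpLoop_dec (p nn : Int) (h : 0 < nn ∧ 2 ≤ p) :
    (PySem.Int.floordiv nn p).toNat < nn.toNat := by
  obtain ⟨hn, hp⟩ := h
  have h2 : PySem.Int.floordiv nn p = nn / p := PySem.Int.floordiv_eq_ediv_of_pos (by omega)
  have : nn / p < nn := by
    apply Int.ediv_lt_of_lt_mul (by omega)
    nlinarith
  rw [h2]
  exact (Int.toNat_lt_toNat hn).mpr this

def pyA_vpLoop (p nn e : Int) : Int :=
  if h : 0 < nn ∧ 2 ≤ p then
    pyA_vpLoop p (PySem.Int.floordiv nn p) (e + PySem.Int.floordiv nn p)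
  else e
termination_by nn.toNat
decreasing_by exact pyA_vpLoop_dec p nn h

def pyA_vp (n p : Int) : Int :=
  if p < 2 then 0 else pyA_vpLoop p n 0

def divides_factorial_py (n : Int) (k : Int) : Bool :=
  if k ≤ 0 then false
  else (pyA_primeFactors k).items.all (fun pe => !(decide (pyA_vp n pe.1 < pe.2)))

-- ===== PORT B =====
-- termination fact for pyB_gcd's inner Euclid loop ('while b: a, b = b, a % b'); Python's % has the
-- divisor's sign, so |a % b| < |b| whenever b ≠ 0
theorem pyB_mod_natAbs_lt (a b : Int) (h : b ≠ 0) : (PySem.Int.mod a b).natAbs < b.natAbs := by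
  rcases lt_or_gt_of_ne h with hb | hb
  · have hbd := PySem.Int.mod_neg_bounds (a := a) hb
    omega
  · have h1 := PySem.Int.mod_nonneg (a := a) hb
    have h2 := PySem.Int.mod_lt (a := a) hb
    omega

-- 'a, b = remaining, i; while b: a, b = b, a % b' of Source B (Euclid's algorithm, returns a)
def pyB_gcd (a b : Int) : Int :=
  if h : b ≠ 0 then pyB_gcd b (PySem.Int.mod a b) else a
termination_by b.natAbs
decreasing_by exact pyB_mod_natAbs_lt a b h

-- 'while i <= n and remaining > 1: … remaining //= gcd; i += 1' of Source B (returns remaining)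
def pyB_loop (n i r : Int) : Int :=
  if h : i ≤ n ∧ 1 < r then
    pyB_loop n (i + 1) (PySem.Int.floordiv r (pyB_gcd r i))
  else r
termination_by (n + 1 - i).toNat
decreasing_by omega

def divides_factorial_py_alt (n : Int) (k : Int) : Bool :=
  if k ≤ 0 then false
  else if k ≤ n then true
  else decide (pyB_loop n 2 k = 1)

-- ===== PRECONDITION & SPEC =====
-- Pre_ excludes n < 0 together with k ≥ 2: there Python A never returns (the 'while nn: nn //= p'
-- loop of _vp_factorial sticks at nn = -1 and loops forever), while B returns False.
def Pre_divides_factorial_py (n : Int) (k : Int) : Prop := 0 ≤ n ∨ k ≤ 1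
instance (n : Int) (k : Int) : Decidable (Pre_divides_factorial_py n k) := by
  unfold Pre_divides_factorial_py; infer_instance

def pvWitness_divides_factorial_py : Int × Int := (5, 6)

def Spec_divides_factorial_py (n : Int) (k : Int) (out : Bool) : Prop := out = divides_factorial_py_alt n k
instance (n : Int) (k : Int) (out : Bool) : Decidable (Spec_divides_factorial_py n k out) := by unfold Spec_divides_factorial_py; infer_instance

-- ===== CLAIM (what is proved, stated in full; the proofs are below) =====
def Claim_equal_divides_factorial_py : Prop := ∀ (n : Int) (k : Int), Dom_divides_factorial_py n k → Pre_divides_factorial_py n k → Spec_divides_factorial_py n k (divides_factorial_py n k)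

-- ===== LEMMAS AND PROOFS =====

theorem toNat_floordiv (x f : Int) (hx : 0 ≤ x) (hf : 0 < f) :
    PySem.Int.floordiv x f = ((x.toNat / f.toNat : Nat) : Int) := by
  have hx' : x = (x.toNat : Int) := (Int.toNat_of_nonneg hx).symm
  have hf' : f = (f.toNat : Int) := (Int.toNat_of_nonneg (le_of_lt hf)).symm
  rw [hx', hf', PySem.Int.floordiv_natCast]
  simp

-- ===== A-side: Legendre's formula for the _vp_factorial loop =====
theorem legendre_dec (p m : Nat) (h : 2 ≤ p ∧ m ≠ 0) : m / p < m :=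
  Nat.div_lt_self (Nat.pos_of_ne_zero h.2) h.1

def legendre (p m : Nat) : Nat :=
  if h : 2 ≤ p ∧ m ≠ 0 then m / p + legendre p (m / p) else 0
termination_by m
decreasing_by exact legendre_dec p m h

theorem vpLoop_eq (p nn e : Int) : 0 ≤ nn → 2 ≤ p →
    pyA_vpLoop p nn e = e + (legendre p.toNat nn.toNat : Int) := by
  fun_induction pyA_vpLoop p nn e with
  | case1 nn e h ih =>
    intro hnn hp
    obtain ⟨hn0, hp2⟩ := h
    have hfd : PySem.Int.floordiv nn p = ((nn.toNat / p.toNat : Nat) : Int) :=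
      toNat_floordiv nn p (by omega) (by omega)
    rw [ih (by rw [hfd]; exact_mod_cast Nat.zero_le _) hp]
    rw [hfd]
    simp only [Int.toNat_natCast]
    have hleg : legendre p.toNat nn.toNat
        = nn.toNat / p.toNat + legendre p.toNat (nn.toNat / p.toNat) := by
      rw [legendre]
      rw [dif_pos ⟨by omega, by omega⟩]
    rw [hleg]
    push_cast
    ring
  | case2 nn e h =>
    intro hnn hp
    have hz : nn = 0 := by omega
    subst hz
    rw [legendre]
    norm_num

def legSum (p b m : Nat) : Nat := ∑ i ∈ Finset.range b, m / p ^ (i + 1)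

theorem legSum_succ (p b m : Nat) : legSum p (b + 1) m = m / p + legSum p b (m / p) := by
  unfold legSum
  rw [Finset.sum_range_succ']
  have h1 : ∀ i : Nat, m / p ^ (i + 1 + 1) = (m / p) / p ^ (i + 1) := by
    intro i
    rw [Nat.div_div_eq_div_mul, ← pow_succ']
  simp only [h1, Nat.zero_add, pow_one]
  exact Nat.add_comm _ _

theorem legendre_eq_legSum (p : Nat) (hp : 2 ≤ p) :
    ∀ m b, m ≤ b → legendre p m = legSum p b m := by
  intro m
  induction m using Nat.strong_induction_on with
  | _ m ih =>
    intro b hb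
    by_cases hm : m = 0
    · subst hm
      rw [legendre]
      simp [legSum, Nat.zero_div]
    · have hdiv_lt : m / p < m := Nat.div_lt_self (Nat.pos_of_ne_zero hm) (by omega)
      have hb1 : 1 ≤ b := by omega
      obtain ⟨b', rfl⟩ : ∃ b', b = b' + 1 := ⟨b - 1, by omega⟩
      rw [legendre, dif_pos ⟨hp, hm⟩, legSum_succ]
      congr 1
      apply ih _ hdiv_lt
      have : m / p ≤ m / 2 := Nat.div_le_div_left (by omega) (by omega)
      have : m / 2 ≤ m - 1 := by omega
      omega

theorem legendre_eq_fact (p m : Nat) (hp : p.Prime) :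
    legendre p m = (m.factorial).factorization p := by
  have hlog : Nat.log p m < m + 1 := by
    have := Nat.log_le_self p m
    omega
  rw [Nat.factorization_factorial hp hlog]
  rw [Finset.sum_Ico_eq_sum_range]
  have h1 : ∀ i : Nat, m / p ^ (1 + i) = m / p ^ (i + 1) := by intro i; ring_nf
  rw [legendre_eq_legSum p hp.two_le m (m + 1 - 1) (by omega)]
  unfold legSum
  exact Finset.sum_congr rfl fun i _ => by rw [h1]

-- ===== A-side: trial-division invariant =====
def listProd (l : List (Int × Int)) : Nat :=
  (l.map (fun pe => pe.1.toNat ^ pe.2.toNat)).prod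

def InvA (m : Nat) (b c x : Int) (pf : PySem.Dict Int Int) : Prop :=
  0 < x ∧ m = x.toNat * listProd pf.items ∧
  (∀ pe ∈ pf.items, 2 ≤ pe.1 ∧ pe.1.toNat.Prime ∧ pe.1 < b ∧ 1 ≤ pe.2) ∧
  pf.keys.Nodup ∧
  (∀ q : Nat, q.Prime → (q : Int) < c → ¬ (q ∣ x.toNat))

theorem keys_eq_map_fst (pf : PySem.Dict Int Int) : pf.keys = pf.items.map Prod.fst := rfl

theorem exists_pair_of_contains (pf : PySem.Dict Int Int) (f : Int)
    (hc : pf.contains f = true) : ∃ e, (f, e) ∈ pf.items := by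
  rw [PySem.Dict.contains_iff_mem_keys, keys_eq_map_fst] at hc
  obtain ⟨p, hp, hfst⟩ := List.mem_map.mp hc
  exact ⟨p.2, by rwa [show (f, p.2) = p from Prod.ext hfst.symm rfl]⟩

theorem getD_nonneg (pf : PySem.Dict Int Int) (hnd : pf.keys.Nodup)
    (hpos : ∀ pe ∈ pf.items, 1 ≤ pe.2) (f : Int) : 0 ≤ pf.getD f 0 := by
  by_cases hc : pf.contains f = true
  · obtain ⟨e, hmem⟩ := exists_pair_of_contains pf f hc
    rw [PySem.Dict.getD_of_mem_items pf hmem hnd 0]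
    exact le_trans (by omega) (hpos _ hmem)
  · rw [PySem.Dict.getD_of_not_contains pf 0 (by simpa using hc)]

theorem map_if_id (l : List (Int × Int)) (f : Int) (X : Int × Int)
    (h : f ∉ l.map Prod.fst) :
    l.map (fun p => if (p.1 == f) = true then X else p) = l := by
  induction l with
  | nil => rfl
  | cons a l ih =>
    simp only [List.map_cons, List.mem_cons, not_or] at h ⊢
    rw [if_neg (by simpa using Ne.symm h.1), ih h.2]

theorem prod_map_replace (l : List (Int × Int)) (f e : Int) (hmem : (f, e) ∈ l)
    (hnd : (l.map Prod.fst).Nodup) (he : 1 ≤ e) :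
    listProd (l.map (fun p => if (p.1 == f) = true then (f, e + 1) else p))
      = listProd l * f.toNat := by
  induction l with
  | nil => simp at hmem
  | cons a l ih =>
    rw [List.map_cons, List.nodup_cons] at hnd
    rcases List.mem_cons.mp hmem with heq | hmem'
    · subst heq
      simp only [List.map_cons, beq_self_eq_true, if_true]
      rw [map_if_id l f _ hnd.1]
      have h1 : (e + 1).toNat = e.toNat + 1 := by omega
      simp only [listProd, List.map_cons, List.prod_cons, h1, pow_succ]
      ring
    · have hne : a.1 ≠ f := by
        intro hq
        exact hnd.1 (hq ▸ List.mem_map.mpr ⟨(f, e), hmem', rfl⟩)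
      simp only [List.map_cons]
      rw [if_neg (by simpa using hne)]
      simp only [listProd, List.map_cons, List.prod_cons] at *
      rw [ih hmem' hnd.2]
      ring

theorem listProd_insert_inc (pf : PySem.Dict Int Int) (f : Int)
    (hnd : pf.keys.Nodup) (hpos : ∀ pe ∈ pf.items, 1 ≤ pe.2) :
    listProd (pf.insert f (pf.getD f 0 + 1)).items = listProd pf.items * f.toNat := by
  by_cases hc : pf.contains f = true
  · obtain ⟨e, hmem⟩ := exists_pair_of_contains pf f hc
    have hD : pf.getD f 0 = e := PySem.Dict.getD_of_mem_items pf hmem hnd 0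
    rw [PySem.Dict.items_insert_of_contains pf _ hc, hD]
    exact prod_map_replace pf.items f e hmem (by rwa [keys_eq_map_fst] at hnd) (hpos _ hmem)
  · rw [PySem.Dict.items_insert_of_not_contains pf _ (by simpa using hc),
      PySem.Dict.getD_of_not_contains pf 0 (by simpa using hc)]
    simp [listProd]

theorem dvd_toNat_of_dvd (f x : Int) (hf : 0 ≤ f) (hx : 0 ≤ x) (h : f ∣ x) :
    f.toNat ∣ x.toNat := by
  have := Int.natAbs_dvd_natAbs.mpr h
  have e1 : f.natAbs = f.toNat := by omega
  have e2 : x.natAbs = x.toNat := by omega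
  rwa [e1, e2] at this

theorem invA_step (m : Nat) (f x : Int) (pf : PySem.Dict Int Int) (hf : 2 ≤ f)
    (hInv : InvA m (f + 1) f x pf) (hdvd : f ∣ x) :
    InvA m (f + 1) f (PySem.Int.floordiv x f) (pf.insert f (pf.getD f 0 + 1)) := by
  obtain ⟨hx, hm, hpairs, hnd, hnos⟩ := hInv
  have hdvdN : f.toNat ∣ x.toNat := dvd_toNat_of_dvd f x (by omega) (by omega) hdvd
  have hxN : 0 < x.toNat := by omega
  have hfN : 2 ≤ f.toNat := by omega
  have hfp : (f.toNat).Prime := by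
    by_contra hnp
    have hq : (f.toNat).minFac.Prime := Nat.minFac_prime (by omega)
    have hqd : (f.toNat).minFac ∣ x.toNat := dvd_trans (Nat.minFac_dvd _) hdvdN
    have hqle : (f.toNat).minFac ≤ f.toNat := Nat.minFac_le (by omega)
    have hqne : (f.toNat).minFac ≠ f.toNat := by
      intro he; exact hnp (he ▸ hq)
    exact hnos _ hq (by omega) hqd
  have hfd : PySem.Int.floordiv x f = ((x.toNat / f.toNat : Nat) : Int) :=
    toNat_floordiv x f (by omega) (by omega)
  have hdivpos : 0 < x.toNat / f.toNat :=
    Nat.div_pos (Nat.le_of_dvd hxN hdvdN) (by omega)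
  have hpos : ∀ pe ∈ pf.items, (1:Int) ≤ pe.2 := fun pe hpe => (hpairs pe hpe).2.2.2
  refine ⟨by rw [hfd]; exact_mod_cast hdivpos, ?_, ?_, ?_, ?_⟩
  · rw [hfd, listProd_insert_inc pf f hnd hpos]
    simp only [Int.toNat_natCast]
    rw [hm]
    have hc := Nat.mul_div_cancel' hdvdN
    calc x.toNat * listProd pf.items
        = (f.toNat * (x.toNat / f.toNat)) * listProd pf.items := by rw [hc]
      _ = x.toNat / f.toNat * (listProd pf.items * f.toNat) := by ring
  · intro pe hpe
    rcases (PySem.Dict.mem_items_insert pf f _ pe).mp hpe with heq | ⟨hold, _⟩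
    · subst heq
      have h0 : 0 ≤ pf.getD f 0 := getD_nonneg pf hnd hpos f
      exact ⟨hf, hfp, by omega, by omega⟩
    · exact hpairs pe hold
  · exact PySem.Dict.nodup_keys_insert pf f _ hnd
  · intro q hq hlt hqd
    apply hnos q hq hlt
    have : x.toNat / f.toNat ∣ x.toNat := Nat.div_dvd_of_dvd hdvdN
    rw [hfd] at hqd
    simp only [Int.toNat_natCast] at hqd
    exact dvd_trans hqd this

theorem divLoop_inv (m : Nat) (f x : Int) (pf : PySem.Dict Int Int) :
    2 ≤ f → InvA m (f + 1) f x pf →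
    InvA m (f + 1) f (pyA_divLoop f x pf).1 (pyA_divLoop f x pf).2 ∧
      ¬ (f ∣ (pyA_divLoop f x pf).1) := by
  fun_induction pyA_divLoop f x pf with
  | case1 x pf h ih =>
    intro hf hInv
    exact ih hf (invA_step m f x pf hf hInv ((PySem.Int.mod_eq_zero_iff_dvd x f).mp h.2.2))
  | case2 x pf h =>
    intro hf hInv
    refine ⟨hInv, fun hdvd => h ⟨hInv.1, hf, (PySem.Int.mod_eq_zero_iff_dvd x f).mpr hdvd⟩⟩

theorem invA_weaken (m : Nat) (b c x : Int) (pf : PySem.Dict Int Int)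
    (h : InvA m b c x pf) (hb : b ≤ b') (hc' : ∀ q : Nat, q.Prime → (q : Int) < c' →
      (q : Int) < c ∨ ¬ (q ∣ (x.toNat))) : InvA m b' c' x pf := by
  obtain ⟨hx, hm, hpairs, hnd, hnos⟩ := h
  refine ⟨hx, hm, fun pe hpe => ?_, hnd, fun q hq hlt hdvd => ?_⟩
  · obtain ⟨h1, h2, h3, h4⟩ := hpairs pe hpe
    exact ⟨h1, h2, by omega, h4⟩
  · rcases hc' q hq hlt with hsm | hnd2
    · exact hnos q hq hsm hdvd
    · exact hnd2 hdvd

theorem fLoop_inv (m : Nat) (f x : Int) (pf : PySem.Dict Int Int) :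
    3 ≤ f → f % 2 = 1 → InvA m f f x pf →
    ∃ g : Int, 3 ≤ g ∧ (pyA_fLoop f x pf).1 < g * g ∧
      InvA m g g (pyA_fLoop f x pf).1 (pyA_fLoop f x pf).2 := by
  fun_induction pyA_fLoop f x pf with
  | case1 f x pf h ih =>
    intro hf hodd hInv
    have hInv1 : InvA m (f + 1) f x pf :=
      invA_weaken m f f x pf hInv (by omega) (fun q _ hlt => by omega)
    obtain ⟨hInv2, hndvd⟩ := divLoop_inv m f x pf (by omega) hInv1
    set x1 := (pyA_divLoop f x pf).1 with hx1
    have hx1pos : 0 < x1 := hInv2.1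
    have hInv3 : InvA m (f + 2) (f + 2) x1 (pyA_divLoop f x pf).2 := by
      apply invA_weaken m (f + 1) f x1 _ hInv2 (by omega)
      intro q hq hlt
      by_cases hqf : (q : Int) < f
      · exact Or.inl hqf
      · right
        intro hqd
        have hqx : (q : Int) ∣ x1 := by
          have : x1 = ((x1.toNat : Nat) : Int) := by omega
          rw [this]
          exact_mod_cast Int.natCast_dvd_natCast.mpr hqd
        by_cases hqf2 : (q : Int) = f
        · exact hndvd (hqf2 ▸ hqx)
        · -- q = f + 1, even, hence q = 2, impossible since f ≥ 3
          have hq1 : (q : Int) = f + 1 := by omega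
          have hqe : q % 2 = 0 := by omega
          have : q = 2 := (Nat.Prime.even_iff hq).mp (Nat.even_iff.mpr hqe)
          omega
    exact ih (by omega) (by omega) hInv3
  | case2 f x pf h =>
    intro hf hodd hInv
    refine ⟨f, hf, ?_, hInv⟩
    by_contra hle
    exact h ⟨hf, by omega⟩

def goodPF (K : Nat) (l : List (Int × Int)) : Prop :=
  K = listProd l ∧ (l.map Prod.fst).Nodup ∧
  ∀ pe ∈ l, 2 ≤ pe.1 ∧ pe.1.toNat.Prime ∧ 1 ≤ pe.2

theorem primeFactors_good (k : Int) (hk : 2 ≤ k) :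
    goodPF k.toNat (pyA_primeFactors k).items := by
  unfold pyA_primeFactors
  rw [if_neg (by omega)]
  have hInv0 : InvA k.toNat 3 2 k PySem.Dict.empty := by
    refine ⟨by omega, by simp [listProd, PySem.Dict.empty], ?_, ?_, ?_⟩
    · intro pe hpe
      simp [PySem.Dict.empty, PySem.Dict.items] at hpe
    · simp [PySem.Dict.keys_empty]
    · intro q hq hlt
      have := hq.two_le
      omega
  obtain ⟨hInv1, hnd2⟩ := divLoop_inv k.toNat 2 k PySem.Dict.empty (by omega) hInv0
  have hInv2 : InvA k.toNat 3 3 (pyA_divLoop 2 k PySem.Dict.empty).1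
      (pyA_divLoop 2 k PySem.Dict.empty).2 := by
    apply invA_weaken k.toNat 3 2 _ _ hInv1 (by omega)
    intro q hq hlt
    by_cases hq2 : (q : Int) < 2
    · exact Or.inl hq2
    · right
      have hqe : q = 2 := by omega
      intro hdvd
      apply hnd2
      subst hqe
      have hx1 : 0 < (pyA_divLoop 2 k PySem.Dict.empty).1 := hInv1.1
      have : (pyA_divLoop 2 k PySem.Dict.empty).1
          = (((pyA_divLoop 2 k PySem.Dict.empty).1.toNat : Nat) : Int) := by omega
      rw [this]
      exact_mod_cast Int.natCast_dvd_natCast.mpr hdvd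
  obtain ⟨g, hg3, hlt, hInvg⟩ := fLoop_inv k.toNat 3 _ _ (by omega) (by decide) hInv2
  obtain ⟨hxpos, hprod, hpairs, hnd, hnos⟩ := hInvg
  set x1 := (pyA_fLoop 3 (pyA_divLoop 2 k PySem.Dict.empty).1 (pyA_divLoop 2 k PySem.Dict.empty).2).1 with hx1def
  set pf1 := (pyA_fLoop 3 (pyA_divLoop 2 k PySem.Dict.empty).1 (pyA_divLoop 2 k PySem.Dict.empty).2).2 with hpf1def
  by_cases h1 : 1 < x1
  · rw [if_pos h1]
    have hX2 : 2 ≤ x1.toNat := by omega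
    have hXp : (x1.toNat).Prime := by
      by_contra hnp
      have hqp : (x1.toNat).minFac.Prime := Nat.minFac_prime (by omega)
      have hsq : (x1.toNat).minFac ^ 2 ≤ x1.toNat := Nat.minFac_sq_le_self (by omega) hnp
      have hgN : (x1.toNat) < g.toNat * g.toNat := by
        have : x1 < g * g := hlt
        have hgg : ((g.toNat * g.toNat : Nat) : Int) = g * g := by push_cast; rw [Int.toNat_of_nonneg (by omega)]
        omega
      have hmf_lt : (x1.toNat).minFac < g.toNat := by nlinarith [sq ((x1.toNat).minFac)]
      exact hnos _ hqp (by omega) (Nat.minFac_dvd _)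
    have hnc : pf1.contains x1 = false := by
      rw [Bool.eq_false_iff]
      intro hc
      obtain ⟨e, hmem⟩ := exists_pair_of_contains pf1 x1 hc
      have hp := hpairs _ hmem
      exact hnos x1.toNat hXp (by have := hp.2.2.1; omega) dvd_rfl
    rw [PySem.Dict.items_insert_of_not_contains pf1 _ hnc,
      PySem.Dict.getD_of_not_contains pf1 0 hnc]
    refine ⟨?_, ?_, ?_⟩
    · rw [hprod]
      simp [listProd, List.prod_append]
      ring
    · rw [List.map_append]
      have : pf1.keys.Nodup := hnd
      rw [keys_eq_map_fst] at this
      simp only [List.map_cons, List.map_nil]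
      apply List.Nodup.append this (by simp)
      intro a ha hb
      simp at hb
      subst hb
      obtain ⟨p, hp, hfst⟩ := List.mem_map.mp ha
      have hmem : (x1, p.2) ∈ pf1.items := by rwa [show (x1, p.2) = p from Prod.ext hfst.symm rfl]
      have := hpairs _ hmem
      exact hnos x1.toNat hXp (by have := this.2.2.1; omega) dvd_rfl
    · intro pe hpe
      rcases List.mem_append.mp hpe with hold | hnew
      · have := hpairs _ hold
        exact ⟨this.1, this.2.1, this.2.2.2⟩
      · simp at hnew
        subst hnew
        exact ⟨by omega, by simpa using hXp, by omega⟩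
  · rw [if_neg h1]
    have hx11 : x1 = 1 := by omega
    refine ⟨?_, by rwa [keys_eq_map_fst] at hnd, fun pe hpe => ?_⟩
    · rw [hprod, hx11]
      simp [← hpf1def]
    · have := hpairs _ hpe
      exact ⟨this.1, this.2.1, this.2.2.2⟩

theorem listProd_ne_zero (l : List (Int × Int)) (h : ∀ pe ∈ l, 2 ≤ pe.1) :
    listProd l ≠ 0 := by
  induction l with
  | nil => simp [listProd]
  | cons a l ih =>
    simp only [listProd, List.map_cons, List.prod_cons]
    apply mul_ne_zero
    · have := h a (List.mem_cons_self ..)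
      exact pow_ne_zero _ (by omega)
    · exact ih fun pe hpe => h pe (List.mem_cons_of_mem _ hpe)

theorem fact_listProd_not_mem (l : List (Int × Int))
    (hpr : ∀ pe ∈ l, 2 ≤ pe.1 ∧ pe.1.toNat.Prime) (q : Nat) (hq : q.Prime)
    (h : (q : Int) ∉ l.map Prod.fst) : (listProd l).factorization q = 0 := by
  induction l with
  | nil => simp [listProd]
  | cons a l ih =>
    simp only [List.map_cons, List.mem_cons, not_or] at h
    have ha := hpr a (List.mem_cons_self ..)
    have hl : ∀ pe ∈ l, 2 ≤ pe.1 ∧ pe.1.toNat.Prime := fun pe hpe => hpr pe (List.mem_cons_of_mem _ hpe)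
    have hstep : listProd (a :: l) = a.1.toNat ^ a.2.toNat * listProd l := by
      simp [listProd]
    rw [hstep]
    rw [Nat.factorization_mul (pow_ne_zero _ (by have := ha.1; omega))
      (listProd_ne_zero l fun pe hpe => (hl pe hpe).1)]
    simp only [Finsupp.add_apply]
    rw [ha.2.factorization_pow]
    have hne : q ≠ a.1.toNat := by
      intro he
      apply h.1
      rw [he, Int.toNat_of_nonneg (by have := ha.1; omega : (0:Int) ≤ a.1)]
    rw [Finsupp.single_apply, if_neg (Ne.symm hne), ih hl h.2]

theorem fact_listProd_mem (l : List (Int × Int))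
    (hpr : ∀ pe ∈ l, 2 ≤ pe.1 ∧ pe.1.toNat.Prime) (hnd : (l.map Prod.fst).Nodup)
    (p e : Int) (hmem : (p, e) ∈ l) :
    (listProd l).factorization p.toNat = e.toNat := by
  induction l with
  | nil => simp at hmem
  | cons a l ih =>
    rw [List.map_cons, List.nodup_cons] at hnd
    have ha := hpr a (List.mem_cons_self ..)
    have hl : ∀ pe ∈ l, 2 ≤ pe.1 ∧ pe.1.toNat.Prime := fun pe hpe => hpr pe (List.mem_cons_of_mem _ hpe)
    have hlnz : listProd l ≠ 0 := listProd_ne_zero l fun pe hpe => (hl pe hpe).1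
    have hstep : listProd (a :: l) = a.1.toNat ^ a.2.toNat * listProd l := by
      simp [listProd]
    rw [hstep, Nat.factorization_mul (pow_ne_zero _ (by have := ha.1; omega)) hlnz]
    simp only [Finsupp.add_apply]
    rw [ha.2.factorization_pow, Finsupp.single_apply]
    rcases List.mem_cons.mp hmem with heq | hmem'
    · subst heq
      have ha1 : (2:Int) ≤ p := by simpa using ha.1
      have ha2 : p.toNat.Prime := by simpa using ha.2
      rw [if_pos rfl]
      rw [fact_listProd_not_mem l hl p.toNat ha2 (fun hin => hnd.1 (by
        rwa [Int.toNat_of_nonneg (by omega : (0:Int) ≤ p)] at hin))]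
      simp
    · have hpmem := hl _ hmem'
      have hne : a.1.toNat ≠ p.toNat := by
        intro he
        apply hnd.1
        have heq : a.1 = p := by
          have h1 := ha.1; have h2 := hpmem.1
          omega
        exact heq ▸ List.mem_map.mpr ⟨(p, e), hmem', rfl⟩
      rw [if_neg hne, ih hl hnd.2 hmem']
      simp

theorem key_of_dvd (l : List (Int × Int))
    (hpr : ∀ pe ∈ l, 2 ≤ pe.1 ∧ pe.1.toNat.Prime) (q : Nat) (hq : q.Prime)
    (hdvd : q ∣ listProd l) : (q : Int) ∈ l.map Prod.fst := by
  induction l with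
  | nil =>
    simp only [listProd, List.map_nil, List.prod_nil] at hdvd
    exact absurd (Nat.eq_one_of_dvd_one hdvd) hq.ne_one
  | cons a l ih =>
    have ha := hpr a (List.mem_cons_self ..)
    have hl : ∀ pe ∈ l, 2 ≤ pe.1 ∧ pe.1.toNat.Prime := fun pe hpe => hpr pe (List.mem_cons_of_mem _ hpe)
    have hstep : listProd (a :: l) = a.1.toNat ^ a.2.toNat * listProd l := by
      simp [listProd]
    rw [hstep] at hdvd
    simp only [List.map_cons, List.mem_cons]
    rcases (Nat.Prime.dvd_mul hq).mp hdvd with hd1 | hd2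
    · left
      have hdq : q ∣ a.1.toNat := hq.dvd_of_dvd_pow hd1
      have heq : q = a.1.toNat := (Nat.prime_dvd_prime_iff_eq hq ha.2).mp hdq
      rw [heq, Int.toNat_of_nonneg (by have := ha.1; omega : (0:Int) ≤ a.1)]
    · exact Or.inr (ih hl hd2)

theorem a_eq_dvd (n k : Int) (hn : 0 ≤ n) (hk : 2 ≤ k) :
    divides_factorial_py n k = decide (k.toNat ∣ (n.toNat).factorial) := by
  unfold divides_factorial_py
  rw [if_neg (by omega)]
  obtain ⟨hprod, hnd, hpairs⟩ := primeFactors_good k hk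
  have hpr : ∀ pe ∈ (pyA_primeFactors k).items, 2 ≤ pe.1 ∧ pe.1.toNat.Prime :=
    fun pe hpe => ⟨(hpairs pe hpe).1, (hpairs pe hpe).2.1⟩
  have hkN : k.toNat ≠ 0 := by omega
  have hfN : (n.toNat).factorial ≠ 0 := Nat.factorial_ne_zero _
  have hvp : ∀ pe ∈ (pyA_primeFactors k).items,
      pyA_vp n pe.1 = (((n.toNat).factorial.factorization pe.1.toNat : Nat) : Int) := by
    intro pe hpe
    obtain ⟨h2, hp, _⟩ := hpairs pe hpe
    unfold pyA_vp
    rw [if_neg (by omega), vpLoop_eq pe.1 n 0 hn (by omega), legendre_eq_fact _ _ hp]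
    simp
  apply Bool.eq_iff_iff.mpr
  rw [List.all_eq_true, decide_eq_true_iff]
  constructor
  · intro hall
    rw [← Nat.factorization_le_iff_dvd hkN hfN, Finsupp.le_def]
    intro q
    by_cases hq : q.Prime
    · by_cases hqd : q ∣ k.toNat
      · have hqk : (q : Int) ∈ (pyA_primeFactors k).items.map Prod.fst :=
          key_of_dvd _ hpr q hq (hprod ▸ hqd)
        obtain ⟨pe, hpe, hfst⟩ := List.mem_map.mp hqk
        have hfac : (listProd (pyA_primeFactors k).items).factorization pe.1.toNat = pe.2.toNat :=
          fact_listProd_mem _ hpr hnd pe.1 pe.2 hpe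
        have hq1 : pe.1.toNat = q := by rw [hfst]; simp
        have hb := hall pe hpe
        rw [Bool.not_eq_eq_eq_not, Bool.not_true, decide_eq_false_iff_not, not_lt, hvp pe hpe] at hb
        rw [← hq1, hprod, hfac]
        omega
      · rw [Nat.factorization_eq_zero_of_not_dvd hqd]
        exact Nat.zero_le _
    · rw [Nat.factorization_eq_zero_of_non_prime _ hq]
      exact Nat.zero_le _
  · intro hdvd pe hpe
    rw [Bool.not_eq_eq_eq_not, Bool.not_true, decide_eq_false_iff_not, not_lt, hvp pe hpe]
    have hfac : (listProd (pyA_primeFactors k).items).factorization pe.1.toNat = pe.2.toNat :=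
      fact_listProd_mem _ hpr hnd pe.1 pe.2 hpe
    have hle := (Nat.factorization_le_iff_dvd hkN hfN).mpr hdvd
    rw [Finsupp.le_def] at hle
    have hq := hle pe.1.toNat
    rw [hprod, hfac] at hq
    have he1 := (hpairs pe hpe).2.2
    omega

theorem one_case_A (n : Int) : divides_factorial_py n 1 = true := by
  unfold divides_factorial_py
  rw [if_neg (by omega)]
  have h2 : pyA_divLoop 2 1 PySem.Dict.empty = (1, PySem.Dict.empty) := by
    rw [pyA_divLoop, dif_neg]
    intro h
    have := (PySem.Int.mod_eq_zero_iff_dvd 1 2).mp h.2.2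
    have := Int.le_of_dvd (by omega) this
    omega
  have h3 : pyA_fLoop 3 1 PySem.Dict.empty = (1, PySem.Dict.empty) := by
    rw [pyA_fLoop, dif_neg]
    intro h
    omega
  unfold pyA_primeFactors
  rw [if_neg (by omega)]
  simp only [h2, h3]
  norm_num [PySem.Dict.empty, PySem.Dict.items]

-- ===== B-side lemmas =====
theorem pyB_gcd_eq (a b : Int) : 0 ≤ a → 0 ≤ b →
    pyB_gcd a b = ((Nat.gcd a.toNat b.toNat : Nat) : Int) := by
  fun_induction pyB_gcd a b with
  | case1 a b h ih =>
    intro ha hb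
    have hb' : 0 < b := by omega
    have hmod : PySem.Int.mod a b = ((a.toNat % b.toNat : Nat) : Int) := by
      rw [PySem.Int.mod_eq_emod_of_pos hb']
      have hc : a % b = (((a.toNat : Nat) : Int)) % (((b.toNat : Nat) : Int)) := by
        rw [Int.toNat_of_nonneg ha, Int.toNat_of_nonneg hb]
      rw [hc, ← Int.natCast_emod]
    rw [ih hb (by rw [hmod]; exact_mod_cast Nat.zero_le _), hmod]
    simp only [Int.toNat_natCast]
    rw [Nat.gcd_comm a.toNat b.toNat, Nat.gcd_rec b.toNat a.toNat]
    rw [Nat.gcd_comm (a.toNat % b.toNat) b.toNat]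
  | case2 a b h =>
    intro ha hb
    have hb0 : b = 0 := by omega
    subst hb0
    simp [Nat.gcd_zero_right, Int.toNat_of_nonneg ha]

-- the inductive step of the gcd sweep: dividing r by gcd(r, i) trades divisibility into P for
-- divisibility into i * P (per prime p, gcd strips exactly min(v_p r, v_p i))
theorem step_dvd (r i P : Nat) (hr : 1 ≤ r) (hi : 1 ≤ i) (hP : 1 ≤ P) :
    (r / Nat.gcd r i ∣ P) ↔ (r ∣ i * P) := by
  have hg : Nat.gcd r i ∣ r := Nat.gcd_dvd_left r i
  have hg1 : 0 < Nat.gcd r i := Nat.gcd_pos_of_pos_right r (by omega)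
  have hq1 : 1 ≤ r / Nat.gcd r i := Nat.div_pos (Nat.le_of_dvd (by omega) hg) hg1
  rw [← Nat.factorization_le_iff_dvd (by omega) (by omega),
      ← Nat.factorization_le_iff_dvd (by omega) (by positivity),
      Nat.factorization_div hg, Nat.factorization_gcd (by omega) (by omega),
      Nat.factorization_mul (by omega) (by omega)]
  constructor
  · intro h
    rw [Finsupp.le_def] at h ⊢
    intro q
    have hq := h q
    simp only [Finsupp.tsub_apply, Finsupp.inf_apply, Finsupp.add_apply] at hq ⊢
    omega
  · intro h
    rw [Finsupp.le_def] at h ⊢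
    intro q
    have hq := h q
    simp only [Finsupp.tsub_apply, Finsupp.inf_apply, Finsupp.add_apply] at hq ⊢
    omega

theorem pyB_loop_spec (n : Int) : ∀ i r : Int, 2 ≤ i → 1 ≤ r →
    ((pyB_loop n i r = 1) ↔ (r.toNat ∣ ∏ j ∈ Finset.Ico i.toNat (n.toNat + 1), j)) := by
  intro i r
  fun_induction pyB_loop n i r with
  | case1 i r h ih =>
    intro hi hr
    obtain ⟨hin, hr1⟩ := h
    have hn2 : 2 ≤ n := le_trans hi hin
    have hiN : 2 ≤ i.toNat := by omega
    have hg : pyB_gcd r i = ((Nat.gcd r.toNat i.toNat : Nat) : Int) :=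
      pyB_gcd_eq r i (by omega) (by omega)
    have hgpos : 0 < Nat.gcd r.toNat i.toNat := Nat.gcd_pos_of_pos_right _ (by omega)
    have hgd : Nat.gcd r.toNat i.toNat ∣ r.toNat := Nat.gcd_dvd_left _ _
    have hfd : PySem.Int.floordiv r (pyB_gcd r i)
        = ((r.toNat / Nat.gcd r.toNat i.toNat : Nat) : Int) := by
      rw [hg]
      have := toNat_floordiv r ((Nat.gcd r.toNat i.toNat : Nat) : Int) (by omega)
        (by exact_mod_cast hgpos)
      simpa using this
    have hr' : 1 ≤ r.toNat / Nat.gcd r.toNat i.toNat :=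
      Nat.div_pos (Nat.le_of_dvd (by omega) hgd) hgpos
    rw [ih (by omega) (by rw [hfd]; exact_mod_cast hr')]
    have hi1 : (i + 1).toNat = i.toNat + 1 := by omega
    have hsplit : ∏ j ∈ Finset.Ico i.toNat (n.toNat + 1), j
        = i.toNat * ∏ j ∈ Finset.Ico (i.toNat + 1) (n.toNat + 1), j :=
      Finset.prod_eq_prod_Ico_succ_bot (by omega) _
    have hPpos : 1 ≤ ∏ j ∈ Finset.Ico (i.toNat + 1) (n.toNat + 1), j := by
      apply Nat.one_le_iff_ne_zero.mpr
      apply Finset.prod_ne_zero_iff.mpr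
      intro j hj
      simp only [Finset.mem_Ico] at hj
      omega
    rw [hfd, hi1]
    simp only [Int.toNat_natCast]
    rw [hsplit, step_dvd r.toNat i.toNat _ (by omega) (by omega) hPpos]
  | case2 i r h =>
    intro hi hr
    rcases (by omega : r = 1 ∨ (1 < r ∧ ¬ i ≤ n)) with h1 | ⟨hr1, hni⟩
    · subst h1
      simp
    · have hemp : Finset.Ico i.toNat (n.toNat + 1) = ∅ :=
        Finset.Ico_eq_empty (by omega)
      rw [hemp]
      simp only [Finset.prod_empty, Nat.dvd_one]
      constructor
      · intro he; omega
      · intro he; omega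

theorem prod_Ico_two_eq_factorial (m : Nat) :
    ∏ j ∈ Finset.Ico 2 (m + 1), j = m.factorial := by
  induction m with
  | zero => decide
  | succ m ih =>
    rcases Nat.eq_zero_or_pos m with h0 | h1
    · subst h0; decide
    · rw [show m + 1 + 1 = (m + 1) + 1 from rfl,
        Finset.prod_Ico_succ_top (by omega), ih, Nat.factorial_succ]
      ring

theorem alt_eq_dvd (n k : Int) (hn : 0 ≤ n) (hk : 1 ≤ k) :
    divides_factorial_py_alt n k = decide (k.toNat ∣ (n.toNat).factorial) := by
  unfold divides_factorial_py_alt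
  rw [if_neg (by omega)]
  by_cases hkn : k ≤ n
  · rw [if_pos hkn]
    exact (decide_eq_true (Nat.dvd_factorial (by omega) (by omega))).symm
  · rw [if_neg hkn]
    apply decide_eq_decide.mpr
    rw [pyB_loop_spec n 2 k (by omega) hk]
    have h2 : (2 : Int).toNat = 2 := rfl
    rw [h2, prod_Ico_two_eq_factorial n.toNat]
  
theorem one_case_B (n : Int) : divides_factorial_py_alt n 1 = true := by
  unfold divides_factorial_py_alt
  rw [if_neg (by omega)]
  by_cases hn : (1:Int) ≤ n
  · rw [if_pos hn]
  · rw [if_neg hn, pyB_loop, dif_neg (fun h => by omega)]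
    norm_num

theorem final_eq (n k : Int) (hpre : 0 ≤ n ∨ k ≤ 1) :
    divides_factorial_py n k = divides_factorial_py_alt n k := by
  by_cases hk0 : k ≤ 0
  · unfold divides_factorial_py divides_factorial_py_alt
    rw [if_pos hk0, if_pos hk0]
  · by_cases hk2 : 2 ≤ k
    · have hn : 0 ≤ n := by rcases hpre with h | h <;> omega
      rw [a_eq_dvd n k hn hk2, alt_eq_dvd n k hn (by omega)]
    · have hk : k = 1 := by omega
      subst hk
      rw [one_case_A, one_case_B]

-- ===== VERDICT (by name: the statement is the Claim_ definition above) =====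
theorem divides_factorial_py_spec : Claim_equal_divides_factorial_py := by
  intro n k _ hpre
  unfold Spec_divides_factorial_py
  exact final_eq n k hpre
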